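-- pv_equiv track=rewrite | github.com/AeriusOhara/adventofcode2022 | problem3/problem3_part2.py | processRucksacks
-- ===== SOURCE A (Python) =====
-- def getPriorityValue(_item):
--     if(_item.isupper() ):
--         return (ord(_item) - 38)
--     else:
--         return (ord(_item) - 96)
--
-- def processRucksacks(_rucksacks):
--     # Get the contents of each bag without duplicate characters
--     rsack1 = "".join(set(_rucksacks[0]))
--     rsack2 = "".join(set(_rucksacks[1]))
--     rsack3 = "".join(set(_rucksacks[2]))
--
--     i = 0
--     score = 0
--     while(i < len(rsack1)):
--         # If the item is also in both rucksack 2 and 3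
--         if( rsack1[i] in rsack2 and rsack1[i] in rsack3):
--             score += getPriorityValue(rsack1[i])
--
--         i += 1
--
--     return score
-- ===== SOURCE B (Python) =====
-- def getPriorityValue(_item):
--     if(_item.isupper() ):
--         return (ord(_item) - 38)
--     else:
--         return (ord(_item) - 96)
--
-- def processRucksacks(_rucksacks):
--     # Count, for each character, in how many of the three rucksacks it occurs:
--     # one counting pass over the deduplicated contents, no membership tests.
--     counts = {}
--     for idx in range(3):
--         for ch in dict.fromkeys(_rucksacks[idx]):
--             counts[ch] = counts.get(ch, 0) + 1
--     return sum(getPriorityValue(ch) for ch, n in counts.items() if n == 3)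
-- ===== Notes on version B (the rewrite author's own statement) =====
-- stated objective: alternative
-- what changed: Replaced the intersection-style membership scanning (for each item of sack 1, test membership in sacks 2 and 3) by a counting algorithm: one dict counts in how many of the three deduplicated sacks each character occurs, and characters with count 3 are summed.
import Mathlib
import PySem

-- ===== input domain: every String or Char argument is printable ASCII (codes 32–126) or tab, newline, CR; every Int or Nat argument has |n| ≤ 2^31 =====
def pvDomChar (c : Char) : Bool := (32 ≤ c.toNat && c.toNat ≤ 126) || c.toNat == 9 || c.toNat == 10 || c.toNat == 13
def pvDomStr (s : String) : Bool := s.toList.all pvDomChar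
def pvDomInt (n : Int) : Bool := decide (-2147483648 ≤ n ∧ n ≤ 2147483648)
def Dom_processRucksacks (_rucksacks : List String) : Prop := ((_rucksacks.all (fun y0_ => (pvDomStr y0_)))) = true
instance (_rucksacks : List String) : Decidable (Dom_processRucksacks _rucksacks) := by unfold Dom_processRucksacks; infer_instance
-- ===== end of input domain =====

-- B replaces A's intersection-style membership scanning by a counting algorithm:
-- one dict counts in how many of the three deduplicated sacks each character
-- occurs, and characters with count 3 are summed (objective: alternative).

-- ===== PORT A =====
-- helper getPriorityValue (identical in both Python sources)
def getPriorityValue (c : Char) : Int :=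
  if PySem.Chars.isupper c then (c.toNat : Int) - 38 else (c.toNat : Int) - 96

-- A's 'while i < len(rsack1)' with i starting at 0 and stepping by 1, as the
-- structural recursion over rsack1 carrying the same score accumulator
def pvWhileA : List Char → List Char → List Char → Int → Int
  | [], _, _, score => score
  | c :: rest, rsack2, rsack3, score =>
      pvWhileA rest rsack2 rsack3
        (if rsack2.contains c && rsack3.contains c then score + getPriorityValue c else score)

def processRucksacks (_rucksacks : List String) : Int :=
  -- _rucksacks[0/1/2]: Pre_ guarantees the indices exist (Python raises IndexError otherwise)
  let rsack1 := PySem.Set.ofList (PySem.List.pyGetD _rucksacks 0 "").toList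
  let rsack2 := PySem.Set.ofList (PySem.List.pyGetD _rucksacks 1 "").toList
  let rsack3 := PySem.Set.ofList (PySem.List.pyGetD _rucksacks 2 "").toList
  pvWhileA rsack1 rsack2 rsack3 0

-- ===== PORT B =====
-- for idx in range(3): for ch in dict.fromkeys(_rucksacks[idx]): counts[ch] = counts.get(ch,0)+1
def processRucksacks_alt (_rucksacks : List String) : Int :=
  let counts := (PySem.List.pyRange 0 3 1).foldl
    (fun d idx =>
      (PySem.List.dedup (PySem.List.pyGetD _rucksacks idx "").toList).foldl
        (fun d c => d.insert c (d.getD c 0 + 1)) d)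
    PySem.Dict.empty
  ((counts.items.filter (fun p => p.2 == (3 : Int))).map (fun p => getPriorityValue p.1)).sum

-- ===== PRECONDITION & SPEC =====
-- Python A raises IndexError when fewer than three rucksacks are given
def Pre_processRucksacks (_rucksacks : List String) : Prop := 3 ≤ _rucksacks.length
instance (_rucksacks : List String) : Decidable (Pre_processRucksacks _rucksacks) := by
  unfold Pre_processRucksacks; infer_instance

def pvWitness_processRucksacks : List String := ["vJrwpWtwJgWr", "jqHRNqRjqzjGDLGL", "PmmdzqPrV"]

def Spec_processRucksacks (_rucksacks : List String) (out : Int) : Prop := out = processRucksacks_alt _rucksacks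
instance (_rucksacks : List String) (out : Int) : Decidable (Spec_processRucksacks _rucksacks out) := by unfold Spec_processRucksacks; infer_instance

-- ===== CLAIM (what is proved, stated in full; the proofs are below) =====
def Claim_equal_processRucksacks : Prop := ∀ (_rucksacks : List String), Dom_processRucksacks _rucksacks → Pre_processRucksacks _rucksacks → Spec_processRucksacks _rucksacks (processRucksacks _rucksacks)

-- ===== LEMMAS AND PROOFS =====
-- A's while loop sums priorities over the filter of rsack1
lemma pvWhileA_eq_sum_filter (r1 r2 r3 : List Char) (acc : Int) :
    pvWhileA r1 r2 r3 acc
      = acc + ((r1.filter (fun c => r2.contains c && r3.contains c)).map getPriorityValue).sum := by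
  induction r1 generalizing acc with
  | nil => simp [pvWhileA]
  | cons c rest ih =>
      rw [pvWhileA, ih, List.filter_cons]
      by_cases h : r2.contains c && r3.contains c
      · rw [if_pos h, if_pos h]; simp; ring
      · rw [if_neg h, if_neg h]

-- count of an element in a nodup list is the membership indicator
lemma count_nodup_indicator {α : Type} [DecidableEq α] (l : List α) (h : l.Nodup) (c : α) :
    l.count c = (if c ∈ l then 1 else 0) := by
  split_ifs with hc
  · exact List.count_eq_one_of_mem h hc
  · exact List.count_eq_zero_of_not_mem hc

-- the concatenated-dedup count is 3 iff the char is in all three sacks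
lemma count_three_iff (s1 s2 s3 : List Char) (c : Char) :
    ((PySem.Set.ofList s1 ++ (PySem.Set.ofList s2 ++ PySem.Set.ofList s3)).count c = 3)
      ↔ (c ∈ s1 ∧ c ∈ s2 ∧ c ∈ s3) := by
  have h1 := count_nodup_indicator _ (PySem.Set.nodup_ofList s1) c
  have h2 := count_nodup_indicator _ (PySem.Set.nodup_ofList s2) c
  have h3 := count_nodup_indicator _ (PySem.Set.nodup_ofList s3) c
  rw [List.count_append, List.count_append, h1, h2, h3]
  simp only [PySem.Set.mem_ofList]
  split_ifs <;> simp_all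

-- two nodup lists with the same membership have equal getPriorityValue sums
lemma sum_map_eq_of_mem_iff (l l' : List Char) (hl : l.Nodup) (hl' : l'.Nodup)
    (h : ∀ c, c ∈ l ↔ c ∈ l') :
    (l.map getPriorityValue).sum = (l'.map getPriorityValue).sum :=
  List.Perm.sum_eq (List.Perm.map _ ((List.perm_ext_iff_of_nodup hl hl').2 h))

-- ===== VERDICT (by name: the statement is the Claim_ definition above) =====
theorem processRucksacks_spec : Claim_equal_processRucksacks := by
  intro rs _ _
  unfold Spec_processRucksacks processRucksacks processRucksacks_alt
  set s1 := (PySem.List.pyGetD rs 0 "").toList with hs1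
  set s2 := (PySem.List.pyGetD rs 1 "").toList with hs2
  set s3 := (PySem.List.pyGetD rs 2 "").toList with hs3
  -- B's nested folds build Counter(dedup s1 ++ (dedup s2 ++ dedup s3))
  have hrange : PySem.List.pyRange 0 3 1 = [0, 1, 2] := by decide
  rw [hrange]
  simp only [List.foldl_cons, List.foldl_nil, PySem.List.dedup_eq_ofList]
  rw [← List.foldl_append, ← List.foldl_append,
      PySem.Dict.foldl_insert_getD_add_one_eq_counter, PySem.Dict.items_counter]
  set L := PySem.Set.ofList s1 ++ (PySem.Set.ofList s2 ++ PySem.Set.ofList s3) with hL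
  simp only [List.filter_map, List.map_map, Function.comp_def]
  rw [pvWhileA_eq_sum_filter, zero_add]
  refine sum_map_eq_of_mem_iff _ _ ((PySem.Set.nodup_ofList s1).filter _)
    ((PySem.Set.nodup_ofList L).filter _) ?_
  intro c
  have hcnt := count_three_iff s1 s2 s3 c
  simp only [List.mem_filter, PySem.Set.mem_ofList, List.contains_eq_mem,
    Bool.and_eq_true, decide_eq_true_eq, beq_iff_eq]
  constructor
  · rintro ⟨hc1, hc2, hc3⟩
    have h3 : L.count c = 3 := hcnt.2 ⟨hc1, hc2, hc3⟩
    refine ⟨?_, by exact_mod_cast h3⟩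
    exact List.count_pos_iff.1 (by omega)
  · rintro ⟨hm, h3⟩
    exact hcnt.1 (by exact_mod_cast h3)
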